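-- pv_equiv track=rewrite | github.com/sergiuiacob1/FII | an3/python/partial/partial.py | problema4
-- ===== SOURCE A (Python) =====
-- def problema4(notes, moves, start):
--     current_pos = start % len(notes)
--     res = [notes[current_pos]]
--     for move in moves:
--         current_pos += move
--         current_pos = current_pos % len(notes)
--         res.append(notes[current_pos])
--
--     return res
-- ===== SOURCE B (Python) =====
-- def problema4(notes, moves, start):
--     # prefix-sum pass: all absolute cumulative positions first, modulo only at lookup
--     positions = [start]
--     for m in moves:
--         positions.append(positions[-1] + m)
--     n = len(notes)
--     return [notes[p % n] for p in positions]
-- ===== Notes on version B (the rewrite author's own statement) =====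
-- stated objective: simpler
-- what changed: B separates the work into a prefix-sum pass building all absolute cumulative positions and a single lookup pass applying the modulo only at indexing time, instead of A's single stepwise loop that re-normalises a running index with a per-step modulo; Pre_ excludes notes = [], where both raise ZeroDivisionError.
import Mathlib
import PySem

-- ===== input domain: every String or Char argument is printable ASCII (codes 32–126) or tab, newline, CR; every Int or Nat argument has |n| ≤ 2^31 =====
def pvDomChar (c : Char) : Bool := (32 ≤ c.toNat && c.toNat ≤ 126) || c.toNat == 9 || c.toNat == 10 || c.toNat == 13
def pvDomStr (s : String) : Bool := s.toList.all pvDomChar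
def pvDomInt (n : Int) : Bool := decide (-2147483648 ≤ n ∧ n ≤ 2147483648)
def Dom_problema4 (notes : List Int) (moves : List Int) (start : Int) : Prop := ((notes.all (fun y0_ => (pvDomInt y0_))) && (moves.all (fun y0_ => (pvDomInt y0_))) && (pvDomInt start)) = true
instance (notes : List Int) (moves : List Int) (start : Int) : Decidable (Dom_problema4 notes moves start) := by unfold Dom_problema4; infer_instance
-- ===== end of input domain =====

-- B builds all cumulative positions in a prefix-sum pass and applies the modulo only at
-- lookup time, instead of A's single stepwise loop with a per-step modulo (objective: simpler).

-- ===== PORT A =====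
-- A's for-loop over moves, carrying the running index and the accumulated result list.
def problema4Loop (notes : List Int) (cp : Int) (res : List Int) : List Int → List Int
  | [] => res
  | m :: ms =>
    let cp' := PySem.Int.mod (cp + m) (notes.length : Int)
    problema4Loop notes cp' (res ++ [(PySem.List.pyGet? notes cp').getD 0]) ms

def problema4 (notes : List Int) (moves : List Int) (start : Int) : List Int :=
  let cp := PySem.Int.mod start (notes.length : Int)
  -- notes[cp]: cp is in range for nonempty notes, so getD's default is never used
  problema4Loop notes cp [(PySem.List.pyGet? notes cp).getD 0] moves

-- ===== PORT B =====
-- prefix-sum pass: the list [start, start+m1, start+m1+m2, …]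
def problema4Positions (s : Int) : List Int → List Int
  | [] => [s]
  | m :: ms => s :: problema4Positions (s + m) ms

def problema4_alt (notes : List Int) (moves : List Int) (start : Int) : List Int :=
  (problema4Positions start moves).map
    (fun p => (PySem.List.pyGet? notes (PySem.Int.mod p (notes.length : Int))).getD 0)

-- ===== PRECONDITION & SPEC =====
-- Pre_ excludes notes = [], on which A raises ZeroDivisionError at the first modulo.
def Pre_problema4 (notes : List Int) (moves : List Int) (start : Int) : Prop := notes ≠ []
instance (notes : List Int) (moves : List Int) (start : Int) : Decidable (Pre_problema4 notes moves start) := by unfold Pre_problema4; infer_instance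

def pvWitness_problema4 : List Int × List Int × Int := ([1, 2, 3], [2, -1, 4], 1)

def Spec_problema4 (notes : List Int) (moves : List Int) (start : Int) (out : List Int) : Prop := out = problema4_alt notes moves start
instance (notes : List Int) (moves : List Int) (start : Int) (out : List Int) : Decidable (Spec_problema4 notes moves start out) := by unfold Spec_problema4; infer_instance

-- ===== CLAIM =====
def Claim_equal_problema4 : Prop := ∀ (notes : List Int) (moves : List Int) (start : Int), Dom_problema4 notes moves start → Pre_problema4 notes moves start → Spec_problema4 notes moves start (problema4 notes moves start)

-- ===== LEMMAS AND PROOFS =====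

-- Python mod is additively compatible: (s % n + m) % n = (s + m) % n.
theorem pymod_add_left (s m n : Int) (hn : 0 < n) :
    PySem.Int.mod (PySem.Int.mod s n + m) n = PySem.Int.mod (s + m) n := by
  simp [PySem.Int.mod_eq_emod_of_pos hn, Int.emod_add_emod]

theorem problema4Loop_eq (notes : List Int) (hne : notes ≠ []) :
    ∀ (ms : List Int) (s : Int) (res : List Int),
      problema4Loop notes (PySem.Int.mod s (notes.length : Int)) res ms =
        res ++ ((problema4Positions s ms).map
          (fun p => (PySem.List.pyGet? notes (PySem.Int.mod p (notes.length : Int))).getD 0)).tail := by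
  have hn : (0 : Int) < (notes.length : Int) := by
    have := List.length_pos_of_ne_nil hne; exact_mod_cast this
  intro ms
  induction ms with
  | nil => intro s res; simp [problema4Loop, problema4Positions]
  | cons m ms ih =>
    intro s res
    simp only [problema4Loop, problema4Positions, List.map_cons, List.tail_cons]
    rw [pymod_add_left s m _ hn, ih (s + m)]
    cases ms <;> simp [problema4Positions, List.append_assoc]

-- ===== VERDICT =====
theorem problema4_spec : Claim_equal_problema4 := by
  intro notes moves start _ hpre
  unfold Spec_problema4 problema4 problema4_alt
  rw [problema4Loop_eq notes hpre moves start]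
  cases moves <;> simp [problema4Positions]
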